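-- pv_equiv track=rewrite | github.com/cmstas/run3-vbsvvh | preselection/condor/submit.py | split_by_events
-- ===== SOURCE A (Python) =====
-- from typing import Dict, List, Any, Optional
--
-- def split_into_chunks(lst: List[Any], chunk_size: int) -> List[List[Any]]:
--     """Split a list into chunks of given size."""
--     return [lst[i:i + chunk_size] for i in range(0, len(lst), chunk_size)]
--
-- def split_by_events(
--     files: List[str],
--     events_per_file: int,
--     max_events_per_job: int
-- ) -> List[List[str]]:
--     """
--     Split files into chunks based on estimated event count.
--
--     Args:
--         files: List of file paths
--         events_per_file: Estimated events per file
--         max_events_per_job: Maximum events per job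
--
--     Returns:
--         List of file lists, one per job
--     """
--     if events_per_file <= 0:
--         # Fallback: one file per job if we can't estimate
--         return [[f] for f in files]
--
--     # Calculate how many files fit in one job
--     files_per_job = max(1, max_events_per_job // events_per_file)
--
--     return split_into_chunks(files, files_per_job)
-- ===== SOURCE B (Python) =====
-- def split_by_events(files, events_per_file, max_events_per_job):
--     if events_per_file <= 0:
--         return [[f] for f in files]
--     result = []
--     current = []
--     events = 0
--     for f in files:
--         if current and events + events_per_file > max_events_per_job:
--             result.append(current)
--             current = []
--             events = 0
--         current.append(f)
--         events += events_per_file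
--     if current:
--         result.append(current)
--     return result
-- ===== Notes on version B (the rewrite author's own statement) =====
-- stated objective: alternative
-- what changed: B packs files in a single pass with a running event counter (flushing the current chunk when the next file would exceed the budget) instead of computing a fixed files_per_job and slicing the list into chunks.
import Mathlib
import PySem

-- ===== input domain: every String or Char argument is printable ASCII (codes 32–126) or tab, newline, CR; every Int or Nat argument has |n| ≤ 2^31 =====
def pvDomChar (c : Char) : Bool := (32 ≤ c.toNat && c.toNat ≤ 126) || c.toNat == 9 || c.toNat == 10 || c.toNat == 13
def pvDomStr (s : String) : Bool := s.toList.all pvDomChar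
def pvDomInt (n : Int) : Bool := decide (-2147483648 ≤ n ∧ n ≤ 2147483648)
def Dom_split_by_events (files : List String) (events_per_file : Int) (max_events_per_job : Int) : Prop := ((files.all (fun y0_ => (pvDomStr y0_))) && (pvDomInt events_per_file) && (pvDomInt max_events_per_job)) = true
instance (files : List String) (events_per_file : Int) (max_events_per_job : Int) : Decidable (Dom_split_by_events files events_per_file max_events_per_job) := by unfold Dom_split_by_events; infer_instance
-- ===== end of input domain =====

-- B repacks the files in ONE pass with a running event counter instead of computing a fixed
-- chunk size and slicing; same return value, alternative decomposition (no speed claim).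

-- ===== PORT A =====
-- lst[i:i+chunk_size] for i in range(0, len(lst), chunk_size)
def split_into_chunks (lst : List String) (chunk_size : Int) : List (List String) :=
  (PySem.List.pyRange 0 lst.length chunk_size).map
    (fun i => PySem.List.slice lst (some i) (some (i + chunk_size)))

def split_by_events (files : List String) (events_per_file : Int) (max_events_per_job : Int) : List (List String) :=
  if events_per_file ≤ 0 then
    files.map (fun f => [f])
  else
    split_into_chunks files (max 1 (PySem.Int.floordiv max_events_per_job events_per_file))

-- ===== PORT B =====
-- one step of B's loop; state = (result, current, events)
def packStep (events_per_file max_events_per_job : Int)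
    (st : List (List String) × List String × Int) (f : String) :
    List (List String) × List String × Int :=
  if st.2.1 ≠ [] ∧ st.2.2 + events_per_file > max_events_per_job then
    (st.1 ++ [st.2.1], [f], events_per_file)
  else
    (st.1, st.2.1 ++ [f], st.2.2 + events_per_file)

def split_by_events_alt (files : List String) (events_per_file : Int) (max_events_per_job : Int) : List (List String) :=
  if events_per_file ≤ 0 then
    files.map (fun f => [f])
  else
    let st := files.foldl (packStep events_per_file max_events_per_job) ([], [], 0)
    if st.2.1 ≠ [] then st.1 ++ [st.2.1] else st.1

-- ===== PRECONDITION & SPEC =====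
def Spec_split_by_events (files : List String) (events_per_file : Int) (max_events_per_job : Int) (out : List (List String)) : Prop := out = split_by_events_alt files events_per_file max_events_per_job
instance (files : List String) (events_per_file : Int) (max_events_per_job : Int) (out : List (List String)) : Decidable (Spec_split_by_events files events_per_file max_events_per_job out) := by unfold Spec_split_by_events; infer_instance

-- ===== CLAIM (what is proved, stated in full; the proofs are below) =====
def Claim_equal_split_by_events : Prop := ∀ (files : List String) (events_per_file : Int) (max_events_per_job : Int), Dom_split_by_events files events_per_file max_events_per_job → Spec_split_by_events files events_per_file max_events_per_job (split_by_events files events_per_file max_events_per_job)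

-- ===== LEMMAS AND PROOFS =====

-- the common normal form: greedy chunks of m files each
def chunksGo (m : Nat) : List String → List (List String)
  | [] => []
  | x :: xs => (x :: xs.take (m - 1)) :: chunksGo m (xs.drop (m - 1))
termination_by l => l.length
decreasing_by simp only [List.length_drop, List.length_cons]; omega

theorem chunksGo_nil (m : Nat) : chunksGo m [] = [] := by rw [chunksGo]

theorem chunksGo_cons (m : Nat) (x : String) (xs : List String) :
    chunksGo m (x :: xs) = (x :: xs.take (m - 1)) :: chunksGo m (xs.drop (m - 1)) := by
  rw [chunksGo]

-- A's slice comprehension computes greedy chunks of m files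
theorem mapSlices (m : Nat) (hm : 1 ≤ m) (lst : List String) :
    (List.range ((lst.length + m - 1) / m)).map (fun j => ((lst.drop (m * j)).take m))
      = chunksGo m lst := by
  match lst with
  | [] =>
    rw [List.length_nil, show (0 + m - 1) / m = 0 from Nat.div_eq_of_lt (by omega)]
    simp [chunksGo_nil]
  | x :: xs =>
    have ih := mapSlices m hm (xs.drop (m - 1))
    have hq : ((x :: xs).length + m - 1) / m = ((xs.drop (m - 1)).length + m - 1) / m + 1 := by
      simp only [List.length_cons, List.length_drop]
      by_cases h : m - 1 ≤ xs.length
      · rw [show xs.length + 1 + m - 1 = (xs.length - (m - 1) + m - 1) + m from by omega,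
            show (xs.length - (m - 1) + m - 1 + m) / m = (xs.length - (m - 1) + m - 1) / m + 1
              from Nat.add_div_right _ (by omega)]
      · rw [show xs.length - (m - 1) = 0 from by omega,
            show (0 + m - 1) / m = 0 from Nat.div_eq_of_lt (by omega),
            show xs.length + 1 + m - 1 = xs.length + m from by omega,
            show (xs.length + m) / m = xs.length / m + 1 from Nat.add_div_right _ (by omega),
            show xs.length / m = 0 from Nat.div_eq_of_lt (by omega)]
    rw [hq, List.range_succ_eq_map, List.map_cons, List.map_map]
    have hf0 : ((x :: xs).drop (m * 0)).take m = x :: xs.take (m - 1) := by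
      simp only [Nat.mul_zero, List.drop_zero]
      conv_lhs => rw [show m = (m - 1) + 1 from by omega]
      rw [List.take_succ_cons]
    have hfs : ((fun j => ((x :: xs).drop (m * j)).take m) ∘ Nat.succ)
        = (fun j => (((xs.drop (m - 1)).drop (m * j)).take m)) := by
      funext j
      simp only [Function.comp]
      have h1 : m * Nat.succ j = ((m - 1) + 1) + m * j := by
        rw [Nat.mul_succ]; omega
      rw [h1, ← List.drop_drop, List.drop_succ_cons, List.drop_drop]
    rw [hf0, hfs, ih, chunksGo_cons]
termination_by lst.length
decreasing_by simp only [List.length_drop, List.length_cons]; omega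

-- A equals the greedy chunks when the chunk size is positive
theorem splitA_eq_chunks (lst : List String) (k : Int) (hk : 1 ≤ k) :
    split_into_chunks lst k = chunksGo k.toNat lst := by
  obtain ⟨m, rfl⟩ : ∃ m : Nat, k = (m : Int) := ⟨k.toNat, by omega⟩
  have hm1 : 1 ≤ m := by omega
  unfold split_into_chunks
  rw [PySem.List.pyRange_of_pos 0 lst.length (by omega)]
  rw [List.map_map]
  have hq : (if (0:Int) < lst.length then (((lst.length : Int) - 0 + (m : Int) - 1) / (m : Int)).toNat else 0)
      = (lst.length + m - 1) / m := by
    rcases Nat.eq_zero_or_pos lst.length with h | h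
    · rw [h]
      simp
      exact (Nat.div_eq_of_lt (by omega)).symm
    · rw [if_pos (by exact_mod_cast h)]
      have hcast : ((lst.length : Int) - 0 + (m : Int) - 1)
          = ((lst.length + m - 1 : Nat) : Int) := by omega
      rw [hcast, ← Int.natCast_div, Int.toNat_natCast]
  rw [hq]
  rw [show ((m : Int) : Int).toNat = m from by omega]
  rw [← mapSlices m hm1 lst]
  apply List.map_congr_left
  intro j _
  simp only [Function.comp]
  have h1 : (0 : Int) + (m : Int) * (j : Int) = ((m * j : Nat) : Int) := by push_cast; ring
  have h2 : (0 : Int) + (m : Int) * (j : Int) + (m : Int) = ((m * j + m : Nat) : Int) := by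
    push_cast; ring
  rw [h2, h1, PySem.List.slice_natCast]
  congr 1
  omega

-- B's flush condition, read off the running chunk length
theorem cond_iff (epf mx : Int) (hepf : 0 < epf) (c : Nat) (hc : 1 ≤ c) :
    (mx < epf * (c : Int) + epf) ↔ (max 1 (PySem.Int.floordiv mx epf)).toNat ≤ c := by
  have hb := PySem.Int.floordiv_lt_iff_lt_mul (a := mx) (b := epf) (q := (c : Int) + 1) hepf
  have harith : ((c : Int) + 1) * epf = epf * (c : Int) + epf := by ring
  rw [harith] at hb
  omega

-- loop invariant for B's fold: the open chunk cur of c ≤ m files carries events = epf * c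
theorem foldB_inv (epf mx : Int) (hepf : 0 < epf) (m : Nat)
    (hm : m = (max 1 (PySem.Int.floordiv mx epf)).toNat) :
    ∀ (lst : List String) (res : List (List String)) (cur : List String) (c : Nat),
      cur ≠ [] → cur.length = c → c ≤ m →
      (if (lst.foldl (packStep epf mx) (res, cur, epf * c)).2.1 ≠ []
       then (lst.foldl (packStep epf mx) (res, cur, epf * c)).1
            ++ [(lst.foldl (packStep epf mx) (res, cur, epf * c)).2.1]
       else (lst.foldl (packStep epf mx) (res, cur, epf * c)).1)
      = res ++ (cur ++ lst.take (m - c)) :: chunksGo m (lst.drop (m - c)) := by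
  have hm1 : 1 ≤ m := by omega
  intro lst
  induction lst with
  | nil =>
    intro res cur c hcur hlen hcm
    simp [List.foldl, hcur, chunksGo_nil]
  | cons f lst ih =>
    intro res cur c hcur hlen hcm
    have hc1 : 1 ≤ c := by
      cases cur with
      | nil => exact absurd rfl hcur
      | cons a l => simp at hlen; omega
    simp only [List.foldl_cons]
    by_cases hfire : mx < epf * (c : Int) + epf
    · have hcm' : m ≤ c := by
        have := (cond_iff epf mx hepf c hc1).mp hfire
        omega
      have hceq : c = m := by omega
      rw [show packStep epf mx (res, cur, epf * (c : Int)) f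
            = (res ++ [cur], [f], epf) from by
        simp [packStep, hcur]; omega]
      have hstep := ih (res ++ [cur]) [f] 1 (by simp) (by simp) hm1
      simp only [Nat.cast_one, mul_one] at hstep
      rw [hstep]
      subst hceq
      simp only [Nat.sub_self, List.take_zero, List.drop_zero, List.append_nil]
      rw [List.append_assoc]
      congr 1
      rw [chunksGo_cons]
      simp
    · have hclt : c < m := by
        by_contra h
        exact hfire ((cond_iff epf mx hepf c hc1).mpr (by omega))
      rw [show packStep epf mx (res, cur, epf * (c : Int)) f
            = (res, cur ++ [f], epf * ((c + 1 : Nat) : Int)) from by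
        simp only [packStep]
        rw [if_neg (fun hco => hfire hco.2)]
        rw [show epf * ((c : Int)) + epf = epf * (((c + 1 : Nat)) : Int) from by push_cast; ring]]
      have hstep := ih res (cur ++ [f]) (c + 1) (by simp) (by simp [hlen]) (by omega)
      rw [hstep]
      have htk : m - c = (m - (c + 1)) + 1 := by omega
      rw [htk, List.take_succ_cons, List.drop_succ_cons]
      simp

-- ===== VERDICT (by name: the statement is the Claim_ definition above) =====
theorem split_by_events_spec : Claim_equal_split_by_events := by
  intro files epf mx _
  unfold Spec_split_by_events split_by_events split_by_events_alt
  by_cases h : epf ≤ 0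
  · simp [h]
  · rw [if_neg h, if_neg h]
    have hepf : 0 < epf := by omega
    have hk1 : 1 ≤ max 1 (PySem.Int.floordiv mx epf) := le_max_left _ _
    rw [splitA_eq_chunks files _ hk1]
    cases files with
    | nil => simp [chunksGo_nil]
    | cons x xs =>
      simp only [List.foldl_cons]
      rw [show packStep epf mx ([], [], 0) x = ([], [x], epf * ((1 : Nat) : Int)) from by
        simp [packStep]]
      have hstep := foldB_inv epf mx hepf _ rfl xs [] [x] 1 (by simp)
        (by simp) (by omega)
      rw [hstep]
      rw [chunksGo_cons]
      simp
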